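-- pv_equiv track=rewrite | github.com/AnnaSmelova/Algorithms_and_Data_Structures | 06. Базовое динамическое программирование/A_Grasshopper.py | grasshopper_solution
-- ===== SOURCE A (Python) =====
-- def grasshopper_solution(n, k, costs):
--     dp = [0] * (n + 1)
--     pr = [0] * (n + 1)
--     costs.append(0)
--     for i in range(2, n + 1):
--         max_cost = dp[i - 1]
--         pr[i] = i - 1
--         for j in range(2, min(i, k + 1)):
--             if max_cost < dp[i - j]:
--                 max_cost = dp[i - j]
--                 pr[i] = i - j
--         dp[i] = max_cost + costs[i - 2]
--     steps = [str(n)]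
--     i = n
--     while i > 1:
--         steps.append(str(pr[i]))
--         i = pr[i]
--     return dp[n], len(steps) - 1, steps[::-1]
-- ===== SOURCE B (Python) =====
-- from collections import deque
--
--
-- def grasshopper_solution(n, k, costs):
--     # Sliding-window maximum via a monotonic deque: O(n) instead of O(n*k).
--     # (Unlike A, this does not mutate `costs`; return value is identical.)
--     ext = costs + [0]
--     w = max(k, 1)                      # predecessors of i are i-1 .. i-w (at least i-1)
--     dp = [0, 0]
--     pr = [0, 0]
--     dq = deque([1])                    # candidate indices, dp strictly decreasing front->back
--     for i in range(2, n + 1):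
--         while dq[0] < i - w:           # drop candidates that fell out of the window
--             dq.popleft()
--         best = dq[0]                   # max dp in window; ties -> closest predecessor
--         pr.append(best)
--         dp.append(dp[best] + ext[i - 2])
--         while dq and dp[dq[-1]] <= dp[i]:
--             dq.pop()
--         dq.append(i)
--     path = []
--     i = n
--     while i > 1:
--         path.append(i)
--         i = pr[i]
--     path.append(i)
--     return dp[n], len(path) - 1, [str(x) for x in reversed(path)]
-- ===== Notes on version B (the rewrite author's own statement) =====
-- stated objective: faster
-- what changed: Replaces A's O(k) inner rescan of the dp window at every position by a monotonic-deque sliding-window maximum (tie-break to the closest predecessor), making the DP linear; the path is collected as ints and stringified once at the end.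
import Mathlib
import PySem

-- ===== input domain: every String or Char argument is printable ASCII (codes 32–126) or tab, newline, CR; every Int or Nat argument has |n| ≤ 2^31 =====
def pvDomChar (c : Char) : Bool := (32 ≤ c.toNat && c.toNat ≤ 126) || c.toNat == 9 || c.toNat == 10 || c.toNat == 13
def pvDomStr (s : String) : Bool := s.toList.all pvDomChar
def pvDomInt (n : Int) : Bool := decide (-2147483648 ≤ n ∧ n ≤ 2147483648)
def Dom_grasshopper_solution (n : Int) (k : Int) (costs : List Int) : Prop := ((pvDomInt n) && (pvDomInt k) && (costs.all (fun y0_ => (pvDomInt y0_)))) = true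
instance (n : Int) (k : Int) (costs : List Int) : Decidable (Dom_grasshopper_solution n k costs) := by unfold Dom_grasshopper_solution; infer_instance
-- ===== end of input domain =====

-- B replaces A's O(k) inner window rescan by a monotonic-deque sliding-window maximum (O(n) DP);
-- equivalence is about the RETURN value only: Python A appends a 0 to `costs` in place, B does not mutate it.

-- ===== PORT A =====
-- xs[i] (IndexError never reached inside Pre_; 0-default only outside it)
def pvG (l : List Int) (i : Int) : Int := (PySem.List.pyGet? l i).getD 0

-- A's inner `for j` loop plus the dp/pr updates of one outer iteration
def pvStepA (k : Int) (cs : List Int) (st : List Int × List Int) (i : Int) : List Int × List Int :=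
  let dp := st.1
  let maxCost := pvG dp (i - 1)
  let pr := st.2.set i.toNat (i - 1)
  let inner := (PySem.List.pyRange 2 (min i (k + 1)) 1).foldl
      (fun (mp : Int × List Int) j =>
        if mp.1 < pvG dp (i - j) then (pvG dp (i - j), mp.2.set i.toNat (i - j)) else mp)
      (maxCost, pr)
  (dp.set i.toNat (inner.1 + pvG cs (i - 2)), inner.2)

-- A's `while i > 1` path loop; fuel only bounds iterations (pr[i] < i inside Pre_, so it never runs out)
def pvPathA (pr : List Int) : Nat → Int → List String → List String
  | 0, _, acc => acc
  | fuel + 1, i, acc =>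
    if 1 < i then pvPathA pr fuel (pvG pr i) (acc ++ [PySem.Int.toStr (pvG pr i)]) else acc

def grasshopper_solution (n : Int) (k : Int) (costs : List Int) : Int × Int × List String :=
  let dp0 : List Int := List.replicate (n + 1).toNat 0
  let pr0 : List Int := List.replicate (n + 1).toNat 0
  let costs' := costs ++ [0]
  let st := (PySem.List.pyRange 2 (n + 1) 1).foldl (pvStepA k costs') (dp0, pr0)
  let steps := pvPathA st.2 (n + 1).toNat n [PySem.Int.toStr n]
  (pvG st.1 n, (steps.length : Int) - 1, steps.reverse)

-- ===== PORT B =====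
-- one iteration of B's loop: prune the deque front, read the window max, append, pop the back, push i
def pvStepB (w : Int) (cs : List Int) (st : List Int × List Int × List Int) (i : Int) :
    List Int × List Int × List Int :=
  let dp := st.1
  let dq := st.2.2.dropWhile (fun m => decide (m < i - w))
  let best := dq.headD 0
  let dp' := dp ++ [pvG dp best + pvG cs (i - 2)]
  let dq' := (dq.reverse.dropWhile (fun m => decide (pvG dp' m ≤ pvG dp' i))).reverse ++ [i]
  (dp', st.2.1 ++ [best], dq')

-- B's path loop (collects ints); fuel only bounds iterations, as in pvPathA
def pvPathB (pr : List Int) : Nat → Int → List Int → List Int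
  | 0, i, acc => acc ++ [i]
  | fuel + 1, i, acc =>
    if 1 < i then pvPathB pr fuel (pvG pr i) (acc ++ [i]) else acc ++ [i]

def grasshopper_solution_alt (n : Int) (k : Int) (costs : List Int) : Int × Int × List String :=
  let ext := costs ++ [0]
  let w := max k 1
  let st := (PySem.List.pyRange 2 (n + 1) 1).foldl (pvStepB w ext) ([0, 0], [0, 0], [1])
  let path := pvPathB st.2.1 (n + 1).toNat n []
  (pvG st.1 n, (path.length : Int) - 1, path.reverse.map PySem.Int.toStr)

-- ===== PRECONDITION & SPEC =====
-- Pre_ excludes exactly the inputs where Python A raises IndexError: negative n (dp[n] on an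
-- empty/short dp) and costs shorter than n-2 (costs[i-2] past the end).
def Pre_grasshopper_solution (n : Int) (k : Int) (costs : List Int) : Prop :=
  0 ≤ n ∧ n - 2 ≤ (costs.length : Int)
instance (n : Int) (k : Int) (costs : List Int) : Decidable (Pre_grasshopper_solution n k costs) := by
  unfold Pre_grasshopper_solution; infer_instance

def pvWitness_grasshopper_solution : Int × Int × List Int := (5, 2, [3, 1, 4])

def Spec_grasshopper_solution (n : Int) (k : Int) (costs : List Int) (out : Int × Int × List String) : Prop :=
  out = grasshopper_solution_alt n k costs
instance (n : Int) (k : Int) (costs : List Int) (out : Int × Int × List String) :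
    Decidable (Spec_grasshopper_solution n k costs out) := by
  unfold Spec_grasshopper_solution; infer_instance

-- ===== CLAIM (what is proved, stated in full; the proofs are below) =====
def Claim_equal_grasshopper_solution : Prop := ∀ (n : Int) (k : Int) (costs : List Int), Dom_grasshopper_solution n k costs → Pre_grasshopper_solution n k costs → Spec_grasshopper_solution n k costs (grasshopper_solution n k costs)

-- ===== LEMMAS AND PROOFS =====

-- ---- indexing facts about pvG ----
lemma pvG_of_nonneg (l : List Int) (m : Int) (h : 0 ≤ m) : pvG l m = (l[m.toNat]?).getD 0 := by
  rw [pvG, PySem.List.pyGet?_of_nonneg l h]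

lemma pvG_set_ne (l : List Int) (t : Nat) (x : Int) (m : Int) (h0 : 0 ≤ m) (h : m.toNat ≠ t) :
    pvG (l.set t x) m = pvG l m := by
  rw [pvG_of_nonneg _ _ h0, pvG_of_nonneg _ _ h0, List.getElem?_set_ne (Ne.symm h)]

lemma pvG_set_eq (l : List Int) (t : Nat) (x : Int) (m : Int) (h0 : 0 ≤ m) (h : m.toNat = t)
    (hlt : t < l.length) : pvG (l.set t x) m = x := by
  rw [pvG_of_nonneg _ _ h0, h, List.getElem?_set_self hlt]; rfl

lemma pvG_append_left (l l' : List Int) (m : Int) (h0 : 0 ≤ m) (h : m.toNat < l.length) :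
    pvG (l ++ l') m = pvG l m := by
  rw [pvG_of_nonneg _ _ h0, pvG_of_nonneg _ _ h0, List.getElem?_append_left h]

lemma pvG_append_length (l : List Int) (x : Int) (m : Int) (h0 : 0 ≤ m) (h : m.toNat = l.length) :
    pvG (l ++ [x]) m = x := by
  rw [pvG_of_nonneg _ _ h0, h]
  simp

lemma pvG_replicate (L : Nat) (m : Int) : pvG (List.replicate L (0 : Int)) m = 0 := by
  rcases h : (PySem.List.pyGet? (List.replicate L (0 : Int)) m) with _ | v
  · simp [pvG, h]
  · have := PySem.List.mem_of_pyGet?_eq_some _ h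
    simp [List.eq_of_mem_replicate this] at h ⊢
    simp [pvG, h]

-- ---- the dominance filter: indices strictly greater (in f) than everything after them ----
def domF (f : Int → Int) : List Int → List Int
  | [] => []
  | m :: rest => if rest.all (fun m' => decide (f m' < f m)) then m :: domF f rest else domF f rest

lemma mem_domF (f : Int → Int) (is : List Int) (y : Int) (h : y ∈ domF f is) : y ∈ is := by
  induction is with
  | nil => simp [domF] at h
  | cons m rest ih =>
    by_cases hc : rest.all (fun m' => decide (f m' < f m))
    · simp [domF, hc] at h
      rcases h with h | h
      · simp [h]
      · exact List.mem_cons_of_mem _ (ih h)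
    · simp only [domF, if_neg hc] at h
      exact List.mem_cons_of_mem _ (ih h)

lemma domF_congr (f g : Int → Int) (is : List Int) (h : ∀ x ∈ is, f x = g x) :
    domF f is = domF g is := by
  induction is with
  | nil => rfl
  | cons m rest ih =>
    have hm : f m = g m := h m (by simp)
    have hr : ∀ x ∈ rest, f x = g x := fun x hx => h x (List.mem_cons_of_mem _ hx)
    have hall : rest.all (fun m' => decide (f m' < f m)) = rest.all (fun m' => decide (g m' < g m)) := by
      rw [Bool.eq_iff_iff]
      simp only [List.all_eq_true, decide_eq_true_eq]
      constructor
      · intro H x hx; rw [← hr x hx, ← hm]; exact H x hx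
      · intro H x hx; rw [hr x hx, hm]; exact H x hx
    simp only [domF, hall, ih hr]

lemma rdrop_cons_neg (p : Int → Bool) (x : Int) (t : List Int) (h : p x = false) :
    ((x :: t).reverse.dropWhile p).reverse = x :: (t.reverse.dropWhile p).reverse := by
  rw [List.reverse_cons, List.dropWhile_append]
  by_cases he : (t.reverse.dropWhile p).isEmpty = true
  · rw [if_pos he]
    rw [List.isEmpty_iff] at he
    simp [List.dropWhile_cons, h, he]
  · rw [if_neg he]
    simp

lemma rdrop_all_pos (p : Int → Bool) (l : List Int) (h : ∀ y ∈ l, p y = true) :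
    (l.reverse.dropWhile p).reverse = [] := by
  rw [List.dropWhile_eq_nil_iff.mpr (fun y hy => h y (List.mem_reverse.mp hy))]
  rfl

lemma dropWhile_eq_self_of (p : Int → Bool) (l : List Int) (h : ∀ y ∈ l, p y = false) :
    l.dropWhile p = l := by
  cases l with
  | nil => rfl
  | cons x t => simp [List.dropWhile_cons, h x (by simp)]

-- push: appending m pops the back elements with f ≤ f m and appends m
lemma domF_push (f : Int → Int) (m : Int) (is : List Int) :
    domF f (is ++ [m]) =
      ((domF f is).reverse.dropWhile (fun x => decide (f x ≤ f m))).reverse ++ [m] := by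
  induction is with
  | nil => simp [domF]
  | cons x xs ih =>
    show domF f (x :: (xs ++ [m])) = _
    simp only [domF]
    by_cases c1 : xs.all (fun m' => decide (f m' < f x)) = true
    · by_cases c2 : f m < f x
      · have hall : ((xs ++ [m]).all (fun m' => decide (f m' < f x))) = true := by
          simp only [List.all_append, c1, Bool.true_and, List.all_cons, List.all_nil,
            Bool.and_true, decide_eq_true_eq]
          exact c2
        have hx : (decide (f x ≤ f m)) = false := by simp; omega
        rw [if_pos hall, if_pos c1, ih,
          rdrop_cons_neg (fun y => decide (f y ≤ f m)) x (domF f xs) hx]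
        rfl
      · have hall : ¬ ((xs ++ [m]).all (fun m' => decide (f m' < f x)) = true) := by
          simp only [List.all_append, List.all_cons, List.all_nil, Bool.and_true,
            Bool.and_eq_true, decide_eq_true_eq]
          intro hc
          exact c2 hc.2
        have hmem' : ∀ y ∈ x :: domF f xs, (fun y => decide (f y ≤ f m)) y = true := by
          intro y hy
          rcases List.mem_cons.mp hy with h | h
          · subst h; simp; omega
          · have := List.all_eq_true.mp c1 y (mem_domF f xs y h)
            simp at this ⊢
            omega
        have hmem : ∀ y ∈ domF f xs, (fun y => decide (f y ≤ f m)) y = true :=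
          fun y hy => hmem' y (List.mem_cons_of_mem _ hy)
        rw [if_neg hall, if_pos c1, ih, rdrop_all_pos _ _ hmem, rdrop_all_pos _ _ hmem']
    · have hall : ¬ ((xs ++ [m]).all (fun m' => decide (f m' < f x)) = true) := by
        simp only [List.all_append, Bool.and_eq_true]
        intro hc
        exact c1 hc.1
      rw [if_neg hall, if_neg c1, ih]
-- prune: dropping the front below a threshold commutes with domF on an increasing list
lemma dropWhile_domF (f : Int → Int) (c : Int) (is : List Int) (hs : is.Pairwise (· < ·)) :
    (domF f is).dropWhile (fun x => decide (x < c)) = domF f (is.dropWhile (fun x => decide (x < c))) := by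
  induction is with
  | nil => rfl
  | cons m rest ih =>
    obtain ⟨hlt, hpw⟩ := List.pairwise_cons.mp hs
    by_cases hm : m < c
    · have hr : (m :: rest).dropWhile (fun x => decide (x < c)) = rest.dropWhile (fun x => decide (x < c)) := by
        simp [List.dropWhile_cons, hm]
      rw [hr, ← ih hpw]
      simp only [domF]
      by_cases c1 : rest.all (fun m' => decide (f m' < f m)) = true
      · rw [if_pos c1]
        simp [List.dropWhile_cons, hm]
      · rw [if_neg c1]
    · have hr : (m :: rest).dropWhile (fun x => decide (x < c)) = m :: rest := by
        simp [List.dropWhile_cons, hm]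
      rw [hr]
      apply dropWhile_eq_self_of
      intro y hy
      rcases List.mem_cons.mp (mem_domF f _ y hy) with h | h
      · subst h; simp; omega
      · have := hlt y h; simp; omega

-- ---- A's scan over the window, descending ----
def pvScan (f : Int → Int) (ds : List Int) (p0 : Int) : Int :=
  ds.foldl (fun p m => if f p < f m then m else p) p0

lemma pvScan_congr (f g : Int → Int) (ds : List Int) (h : ∀ x ∈ ds, f x = g x) :
    ∀ p0, f p0 = g p0 → pvScan f ds p0 = pvScan g ds p0 := by
  induction ds with
  | nil => intro p0 _; rfl
  | cons m rest ih =>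
    intro p0 hp
    have hm : f m = g m := h m (by simp)
    have hr : ∀ x ∈ rest, f x = g x := fun x hx => h x (List.mem_cons_of_mem _ hx)
    simp only [pvScan, List.foldl_cons, hp, hm]
    by_cases hlt : g p0 < g m
    · simp only [if_pos hlt]; exact ih hr m hm
    · simp only [if_neg hlt]; exact ih hr p0 hp

-- the deque front is exactly what A's descending scan selects, and it is the window maximum
lemma headD_domF_range (f : Int → Int) (hi : Int) :
    ∀ (t : Nat) (lo : Int), lo + t = hi →
    (domF f (PySem.List.pyRange lo (hi + 1) 1)).headD 0
        = pvScan f ((PySem.List.pyRange lo hi 1).reverse) hi ∧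
      lo ≤ (domF f (PySem.List.pyRange lo (hi + 1) 1)).headD 0 ∧
      (domF f (PySem.List.pyRange lo (hi + 1) 1)).headD 0 ≤ hi ∧
      ∀ m, lo ≤ m → m ≤ hi → f m ≤ f ((domF f (PySem.List.pyRange lo (hi + 1) 1)).headD 0) := by
  intro t
  induction t with
  | zero =>
    intro lo hlo
    have hl : lo = hi := by omega
    subst hl
    rw [PySem.List.pyRange_one_singleton, PySem.List.pyRange_one_eq_nil (le_refl lo)]
    refine ⟨rfl, ?_, ?_, ?_⟩
    · simp [domF]
    · simp [domF]
    · intro m h1 h2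
      have : m = lo := by omega
      simp [this, domF]
  | succ t ih =>
    intro lo hlo
    have hlt : lo < hi := by omega
    obtain ⟨ih1, ih2, ih3, ih4⟩ := ih (lo + 1) (by omega)
    rw [PySem.List.pyRange_one_cons (show lo < hi + 1 by omega),
      PySem.List.pyRange_one_cons hlt]
    have hscan : pvScan f ((lo :: PySem.List.pyRange (lo + 1) hi 1).reverse) hi
        = if f (pvScan f ((PySem.List.pyRange (lo + 1) hi 1).reverse) hi) < f lo then lo
          else pvScan f ((PySem.List.pyRange (lo + 1) hi 1).reverse) hi := by
      rw [List.reverse_cons]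
      simp [pvScan, List.foldl_append]
    rw [hscan, ← ih1]
    simp only [domF]
    by_cases hfp : f ((domF f (PySem.List.pyRange (lo + 1) (hi + 1) 1)).headD 0) < f lo
    · have hall : (PySem.List.pyRange (lo + 1) (hi + 1) 1).all (fun m' => decide (f m' < f lo)) = true := by
        simp only [List.all_eq_true, decide_eq_true_eq]
        intro x hx
        obtain ⟨h1, h2⟩ := PySem.List.mem_pyRange_one.mp hx
        exact lt_of_le_of_lt (ih4 x h1 (by omega)) hfp
      rw [if_pos hall, if_pos hfp]
      refine ⟨rfl, le_refl _, le_of_lt hlt, ?_⟩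
      intro m h1 h2
      rcases eq_or_lt_of_le h1 with h | h
      · rw [← h]
        exact le_refl _
      · exact le_of_lt (lt_of_le_of_lt (ih4 m (by omega) h2) hfp)
    · have hall : ¬ ((PySem.List.pyRange (lo + 1) (hi + 1) 1).all (fun m' => decide (f m' < f lo)) = true) := by
        simp only [List.all_eq_true, decide_eq_true_eq]
        intro H
        exact hfp (H _ (PySem.List.mem_pyRange_one.mpr ⟨ih2, by omega⟩))
      rw [if_neg hall, if_neg hfp]
      refine ⟨rfl, by omega, ih3, ?_⟩
      intro m h1 h2
      rcases eq_or_lt_of_le h1 with h | h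
      · rw [← h]
        exact not_lt.mp hfp
      · exact ih4 m (by omega) h2

-- A's inner fold, with the pr-cell updates peeled off
lemma innerA_eq (f : Int → Int) (it : Nat) :
    ∀ (ds : List Int) (p0 : Int) (pr : List Int),
    ds.foldl (fun (mp : Int × List Int) m =>
        if mp.1 < f m then (f m, mp.2.set it m) else mp) (f p0, pr.set it p0)
      = (f (pvScan f ds p0), pr.set it (pvScan f ds p0)) := by
  intro ds
  induction ds with
  | nil => intro p0 pr; rfl
  | cons m rest ih =>
    intro p0 pr
    simp only [List.foldl_cons, pvScan, List.foldl_cons]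
    by_cases hlt : f p0 < f m
    · simp only [if_pos hlt, List.set_set]
      exact ih m pr
    · simp only [if_neg hlt]
      exact ih p0 pr

-- range arithmetic
lemma dropWhile_pyRange (c : Int) : ∀ (t : Nat) (a b : Int), b - a ≤ t →
    (PySem.List.pyRange a b 1).dropWhile (fun m => decide (m < c)) = PySem.List.pyRange (max a c) b 1 := by
  intro t
  induction t with
  | zero =>
    intro a b h
    rw [PySem.List.pyRange_one_eq_nil (by omega), PySem.List.pyRange_one_eq_nil (by omega)]
    rfl
  | succ t ih =>
    intro a b h
    by_cases hab : a < b
    · rw [PySem.List.pyRange_one_cons hab]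
      by_cases hc : a < c
      · rw [List.dropWhile_cons, if_pos (by simpa using hc), ih (a + 1) b (by omega)]
        congr 1
        omega
      · rw [List.dropWhile_cons, if_neg (by simpa using hc), ← PySem.List.pyRange_one_cons hab]
        congr 1
        omega
    · rw [PySem.List.pyRange_one_eq_nil (by omega), PySem.List.pyRange_one_eq_nil (by omega)]
      rfl

lemma map_sub_pyRange (i a b : Int) :
    (PySem.List.pyRange a b 1).map (fun j => i - j)
      = (PySem.List.pyRange (i - b + 1) (i - a + 1) 1).reverse := by
  have h1 : PySem.List.pyRange (i - a) (i - b) (-1)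
      = (PySem.List.pyRange (i - b + 1) (i - a + 1) 1).reverse := by
    have := PySem.List.pyRange_neg_one_eq_reverse (i - a) (i - b)
    simpa using this
  rw [← h1, PySem.List.pyRange_one, PySem.List.pyRange_neg_one, List.map_map]
  have h2 : (i - a - (i - b)).toNat = (b - a).toNat := by omega
  rw [h2]
  apply List.map_congr_left
  intro q _
  simp only [Function.comp_apply]
  ring

-- ---- path reconstruction ----
def chainL (pr : List Int) : Nat → Int → List Int
  | 0, _ => []
  | fuel + 1, i => if 1 < i then pvG pr i :: chainL pr fuel (pvG pr i) else []

lemma pvPathA_eq (pr : List Int) : ∀ (fuel : Nat) (i : Int) (acc : List String),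
    pvPathA pr fuel i acc = acc ++ (chainL pr fuel i).map PySem.Int.toStr := by
  intro fuel
  induction fuel with
  | zero => intro i acc; simp [pvPathA, chainL]
  | succ f ih =>
    intro i acc
    by_cases h : 1 < i
    · simp [pvPathA, chainL, h, ih]
    · simp [pvPathA, chainL, h]

lemma pvPathB_eq (pr : List Int) : ∀ (fuel : Nat) (i : Int) (acc : List Int),
    pvPathB pr fuel i acc = acc ++ i :: chainL pr fuel i := by
  intro fuel
  induction fuel with
  | zero => intro i acc; simp [pvPathB, chainL]
  | succ f ih =>
    intro i acc
    by_cases h : 1 < i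
    · simp [pvPathB, chainL, h, ih]
    · simp [pvPathB, chainL, h]

lemma chainL_congr (prA prB : List Int) (N : Int)
    (hag : ∀ m : Int, 2 ≤ m → m ≤ N → pvG prA m = pvG prB m)
    (hbd : ∀ m : Int, 2 ≤ m → m ≤ N → 1 ≤ pvG prB m ∧ pvG prB m < m) :
    ∀ (fuel : Nat) (i : Int), i ≤ N → chainL prA fuel i = chainL prB fuel i := by
  intro fuel
  induction fuel with
  | zero => intro i _; rfl
  | succ f ih =>
    intro i hi
    by_cases h : 1 < i
    · have h2 : 2 ≤ i := by omega
      have he := hag i h2 hi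
      have hb := hbd i h2 hi
      simp only [chainL, if_pos h, he]
      rw [ih (pvG prB i) (by omega)]
    · simp [chainL, h]

-- ---- the coupled loop invariant ----
def pvInv (n k i : Int) (A : List Int × List Int) (B : List Int × List Int × List Int) : Prop :=
  A.1.length = (n + 1).toNat ∧ A.2.length = (n + 1).toNat ∧
  B.1.length = i.toNat ∧ B.2.1.length = i.toNat ∧
  (∀ m : Int, 0 ≤ m → m ≤ i - 1 → pvG A.1 m = pvG B.1 m) ∧
  (∀ m : Int, 0 ≤ m → m ≤ i - 1 → pvG A.2 m = pvG B.2.1 m) ∧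
  (∀ m : Int, 2 ≤ m → m ≤ i - 1 → 1 ≤ pvG B.2.1 m ∧ pvG B.2.1 m < m) ∧
  B.2.2 = domF (pvG B.1) (PySem.List.pyRange (max 1 (i - 1 - max k 1)) i 1)

lemma pvStep_inv (n k : Int) (cs : List Int) (i : Int) (h2 : 2 ≤ i) (hn : i ≤ n)
    (A : List Int × List Int) (B : List Int × List Int × List Int)
    (hinv : pvInv n k i A B) :
    pvInv n k (i + 1) (pvStepA k cs A i) (pvStepB (max k 1) cs B i) := by
  obtain ⟨hA1, hA2, hB1, hB2, hdp, hpr, hbnd, hdq⟩ := hinv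
  have hw : (1 : Int) ≤ max k 1 := le_max_right _ _
  set w := max k 1 with hwdef
  set lo := max 1 (i - w) with hlodef
  have hlo1 : 1 ≤ lo := le_max_left _ _
  have hloi : lo ≤ i - 1 := by omega
  -- the pruned deque is the dominance filter of the current window
  have hprune : B.2.2.dropWhile (fun m => decide (m < i - w))
      = domF (pvG B.1) (PySem.List.pyRange lo i 1) := by
    rw [hdq, dropWhile_domF _ _ _ (PySem.List.pairwise_lt_pyRange_one _ _),
      dropWhile_pyRange (i - w) (i - max 1 (i - 1 - w)).toNat _ _ (by omega)]
    have e : max (max 1 (i - 1 - w)) (i - w) = lo := by omega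
    rw [e]
  have hmain := headD_domF_range (pvG B.1) (i - 1) (i - 1 - lo).toNat lo (by omega)
  rw [show i - 1 + 1 = i by omega] at hmain
  obtain ⟨hm1, hm2, hm3, hm4⟩ := hmain
  set p := (domF (pvG B.1) (PySem.List.pyRange lo i 1)).headD 0 with hpdef
  -- A's inner scan runs over the same window, descending
  have hmap : (PySem.List.pyRange 2 (min i (k + 1)) 1).map (fun j => i - j)
      = (PySem.List.pyRange lo (i - 1) 1).reverse := by
    by_cases hk : k ≤ 1
    · rw [PySem.List.pyRange_one_eq_nil (show min i (k + 1) ≤ 2 by omega),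
        PySem.List.pyRange_one_eq_nil (show i - 1 ≤ lo by omega)]
      rfl
    · rw [map_sub_pyRange]
      have e1 : i - min i (k + 1) + 1 = lo := by omega
      have e2 : i - 2 + 1 = i - 1 := by omega
      rw [e1, e2]
  set pA := pvScan (pvG A.1) ((PySem.List.pyRange lo (i - 1) 1).reverse) (i - 1) with hpAdef
  have hfold :
      (PySem.List.pyRange 2 (min i (k + 1)) 1).foldl
        (fun (mp : Int × List Int) j =>
          if mp.1 < pvG A.1 (i - j) then (pvG A.1 (i - j), mp.2.set i.toNat (i - j)) else mp)
        (pvG A.1 (i - 1), A.2.set i.toNat (i - 1))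
      = (pvG A.1 pA, A.2.set i.toNat pA) := by
    have hfm := (List.foldl_map (f := fun j : Int => i - j)
        (g := fun (mp : Int × List Int) m =>
          if mp.1 < pvG A.1 m then (pvG A.1 m, mp.2.set i.toNat m) else mp)
        (l := PySem.List.pyRange 2 (min i (k + 1)) 1)
        (init := (pvG A.1 (i - 1), A.2.set i.toNat (i - 1)))).symm
    rw [hmap] at hfm
    exact hfm.trans (innerA_eq (pvG A.1) i.toNat _ (i - 1) A.2)
  have hscan_eq : pA = pvScan (pvG B.1) ((PySem.List.pyRange lo (i - 1) 1).reverse) (i - 1) := by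
    apply pvScan_congr
    · intro x hx
      obtain ⟨hx1, hx2⟩ := PySem.List.mem_pyRange_one.mp (List.mem_reverse.mp hx)
      exact hdp x (by omega) (by omega)
    · exact hdp (i - 1) (by omega) (by omega)
  have hpeq : p = pA := hm1.trans hscan_eq.symm
  have hvals : pvG A.1 pA = pvG B.1 p := by
    rw [← hpeq]
    exact hdp p (by omega) (by omega)
  have hstepA : pvStepA k cs A i
      = (A.1.set i.toNat (pvG A.1 pA + pvG cs (i - 2)), A.2.set i.toNat pA) := by
    simp only [pvStepA]
    rw [hfold]
  set v := pvG B.1 p + pvG cs (i - 2) with hvdef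
  have hstepB : pvStepB w cs B i
      = (B.1 ++ [v], B.2.1 ++ [p], domF (pvG (B.1 ++ [v])) (PySem.List.pyRange lo (i + 1) 1)) := by
    simp only [pvStepB]
    rw [hprune, ← hpdef]
    have hcongr : domF (pvG B.1) (PySem.List.pyRange lo i 1)
        = domF (pvG (B.1 ++ [v])) (PySem.List.pyRange lo i 1) := by
      apply domF_congr
      intro x hx
      obtain ⟨hx1, hx2⟩ := PySem.List.mem_pyRange_one.mp hx
      exact (pvG_append_left B.1 [v] x (by omega) (by omega)).symm
    rw [hcongr, ← domF_push (pvG (B.1 ++ [v])) i (PySem.List.pyRange lo i 1),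
      ← PySem.List.pyRange_one_succ_right (show lo ≤ i by omega)]
  rw [hstepA, hstepB]
  have hset : i.toNat < (n + 1).toNat := by omega
  have htn : i.toNat = (i : Int).toNat := rfl
  refine ⟨by simpa using hA1, by simpa using hA2, by simp [hB1]; omega, by simp [hB2]; omega,
    ?_, ?_, ?_, ?_⟩
  · intro m h0 hm
    by_cases hmi : m = i
    · subst hmi
      rw [pvG_set_eq _ _ _ _ h0 rfl (by omega),
        pvG_append_length _ _ _ h0 (by omega)]
      rw [hvals]
    · rw [pvG_set_ne _ _ _ _ h0 (by omega), pvG_append_left _ _ _ h0 (by omega)]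
      exact hdp m h0 (by omega)
  · intro m h0 hm
    by_cases hmi : m = i
    · subst hmi
      rw [pvG_set_eq _ _ _ _ h0 rfl (by omega),
        pvG_append_length _ _ _ h0 (by omega), hpeq]
    · rw [pvG_set_ne _ _ _ _ h0 (by omega), pvG_append_left _ _ _ h0 (by omega)]
      exact hpr m h0 (by omega)
  · intro m h2m hm
    by_cases hmi : m = i
    · subst hmi
      rw [pvG_append_length _ _ _ (by omega) (by omega)]
      omega
    · rw [pvG_append_left _ _ _ (by omega) (by omega)]
      exact hbnd m h2m (by omega)
  · rw [show i + 1 - 1 = i by omega]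

lemma pvFold_inv (n k : Int) (cs : List Int) :
    ∀ (t : Nat) (i : Int), i + t = n + 1 → 2 ≤ i →
    ∀ (A : List Int × List Int) (B : List Int × List Int × List Int), pvInv n k i A B →
    pvInv n k (n + 1) ((PySem.List.pyRange i (n + 1) 1).foldl (pvStepA k cs) A)
      ((PySem.List.pyRange i (n + 1) 1).foldl (pvStepB (max k 1) cs) B) := by
  intro t
  induction t with
  | zero =>
    intro i hi _ A B hinv
    rw [PySem.List.pyRange_one_eq_nil (by omega)]
    simpa using (by omega : i = n + 1) ▸ hinv
  | succ t ih =>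
    intro i hi h2 A B hinv
    rw [PySem.List.pyRange_one_cons (by omega)]
    simp only [List.foldl_cons]
    exact ih (i + 1) (by omega) (by omega) _ _ (pvStep_inv n k cs i h2 (by omega) A B hinv)

-- ===== VERDICT (by name: the statement is the Claim_ definition above) =====
lemma pvBase_inv (n k : Int) (h : 2 ≤ n) :
    pvInv n k 2 (List.replicate (n + 1).toNat 0, List.replicate (n + 1).toNat 0)
      ([0, 0], [0, 0], [1]) := by
  refine ⟨by simp, by simp, rfl, rfl, ?_, ?_, by omega, ?_⟩
  · intro m h0 hm
    rw [pvG_replicate]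
    have : m = 0 ∨ m = 1 := by omega
    rcases this with h | h <;> subst h <;> rfl
  · intro m h0 hm
    rw [pvG_replicate]
    have : m = 0 ∨ m = 1 := by omega
    rcases this with h | h <;> subst h <;> rfl
  · have e : max 1 (2 - 1 - max k 1) = 1 := by omega
    rw [e, show (2 : Int) = 1 + 1 from rfl, PySem.List.pyRange_one_singleton]
    simp [domF]

theorem grasshopper_solution_spec : Claim_equal_grasshopper_solution := by
  intro n k costs _ hpre
  obtain ⟨hn, hlen⟩ := hpre
  simp only [Spec_grasshopper_solution, grasshopper_solution, grasshopper_solution_alt]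
  by_cases hsmall : n ≤ 1
  · have : n = 0 ∨ n = 1 := by omega
    rcases this with h | h <;> subst h <;>
      simp [PySem.List.pyRange_one_eq_nil, pvPathA, pvPathB, pvG_replicate] <;> rfl
  · have hfin := pvFold_inv n k (costs ++ [0]) (n - 1).toNat 2 (by omega) (by omega)
      _ _ (pvBase_inv n k (by omega))
    obtain ⟨_, _, _, _, hdp, hpr, hbnd, _⟩ := hfin
    set stA := (PySem.List.pyRange 2 (n + 1) 1).foldl (pvStepA k (costs ++ [0]))
      (List.replicate (n + 1).toNat 0, List.replicate (n + 1).toNat 0) with hstA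
    set stB := (PySem.List.pyRange 2 (n + 1) 1).foldl (pvStepB (max k 1) (costs ++ [0]))
      ([0, 0], [0, 0], [1]) with hstB
    have hchain : chainL stA.2 (n + 1).toNat n = chainL stB.2.1 (n + 1).toNat n := by
      apply chainL_congr stA.2 stB.2.1 n
      · intro m hm2 hmn
        exact hpr m (by omega) (by omega)
      · intro m hm2 hmn
        exact hbnd m hm2 (by omega)
      · exact le_refl n
    rw [pvPathA_eq, pvPathB_eq, hchain]
    refine Prod.ext ?_ (Prod.ext ?_ ?_)
    · exact hdp n (by omega) (by omega)
    · simp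
    · simp [List.map_reverse]
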